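-- pv_equiv track=rewrite | github.com/riceissa/issarice.com | static/newlink.py | find_top_lines
-- ===== SOURCE A (Python) =====
-- def find_top_lines(lst):
--     '''
--     Return the third item in the list containing just "---\n". Return -1
--     if there are less than three items containing just "---\n".
--     '''
--     num_dash = 0
--     n = len(lst)
--     i = 0
--     while i < n and num_dash < 3:
--         if lst[i] == "---\n":
--             num_dash += 1
--         i += 1
--     if num_dash == 3:
--         return (i - 1)
--     else:
--         return -1
-- ===== SOURCE B (Python) =====
-- def find_top_lines(lst):
--     '''
--     Return the third item in the list containing just "---\n". Return -1
--     if there are less than three items containing just "---\n".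
--     '''
--     idx = [i for i, x in enumerate(lst) if x == "---\n"]
--     return idx[2] if len(idx) >= 3 else -1
-- ===== Notes on version B (the rewrite author's own statement) =====
-- stated objective: simpler
-- what changed: Replaces the count-to-three while loop with manual index bookkeeping by a single gather-all-match-positions comprehension followed by positional selection of the third match.
import Mathlib
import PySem

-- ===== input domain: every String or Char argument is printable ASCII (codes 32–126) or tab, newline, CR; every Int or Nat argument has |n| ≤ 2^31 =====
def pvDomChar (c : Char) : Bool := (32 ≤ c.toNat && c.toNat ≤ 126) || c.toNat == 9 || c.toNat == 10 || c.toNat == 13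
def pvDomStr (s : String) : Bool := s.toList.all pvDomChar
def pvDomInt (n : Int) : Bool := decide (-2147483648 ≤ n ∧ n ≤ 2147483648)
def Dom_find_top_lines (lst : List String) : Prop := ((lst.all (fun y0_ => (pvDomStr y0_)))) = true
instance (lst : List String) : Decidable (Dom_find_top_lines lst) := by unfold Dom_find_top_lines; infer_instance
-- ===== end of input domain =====

-- B replaces A's count-to-three while loop by gathering all match positions and selecting the third; objective: simpler.

-- ===== PORT A =====
-- the while loop: state (i, num_dash), scanning the remaining suffix; the `i < n`
-- conjunct of the loop condition is the cons/nil split of the suffix.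
def findTopLoop : List String → Int → Nat → Int × Nat
  | [], i, nd => (i, nd)
  | x :: rest, i, nd =>
    if nd < 3 then
      findTopLoop rest (i + 1) (if x == "---\n" then nd + 1 else nd)
    else (i, nd)

def find_top_lines (lst : List String) : Int :=
  let r := findTopLoop lst 0 0
  if r.2 = 3 then r.1 - 1 else -1

-- ===== PORT B =====
def find_top_lines_alt (lst : List String) : Int :=
  let idx := ((PySem.List.enumerate lst).filter (fun p => p.2 == "---\n")).map (fun p => p.1)
  if 3 ≤ idx.length then idx.getD 2 (-1) else -1

-- ===== PRECONDITION & SPEC =====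
def Spec_find_top_lines (lst : List String) (out : Int) : Prop := out = find_top_lines_alt lst
instance (lst : List String) (out : Int) : Decidable (Spec_find_top_lines lst out) := by unfold Spec_find_top_lines; infer_instance

-- ===== CLAIM (what is proved, stated in full; the proofs are below) =====
def Claim_equal_find_top_lines : Prop := ∀ (lst : List String), Dom_find_top_lines lst → Spec_find_top_lines lst (find_top_lines lst)

-- ===== LEMMAS AND PROOFS =====

-- the list of match positions when scanning from start index s
def matchIdxs (lst : List String) (s : Int) : List Int :=
  ((PySem.List.enumerate lst s).filter (fun p => p.2 == "---\n")).map (fun p => p.1)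

theorem matchIdxs_nil (s : Int) : matchIdxs [] s = [] := by
  simp [matchIdxs, PySem.List.enumerate_nil]

theorem matchIdxs_cons (x : String) (rest : List String) (s : Int) :
    matchIdxs (x :: rest) s =
      if x == "---\n" then s :: matchIdxs rest (s + 1) else matchIdxs rest (s + 1) := by
  simp only [matchIdxs, PySem.List.enumerate_cons, List.filter_cons]
  by_cases h : x == "---\n" <;> simp [h]

theorem findTopLoop_done (lst : List String) (s : Int) :
    findTopLoop lst s 3 = (s, 3) := by
  cases lst <;> simp [findTopLoop]

theorem findTopLoop_eq (lst : List String) (s : Int) (nd : Nat) (h : nd < 3) :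
    findTopLoop lst s nd =
      match (matchIdxs lst s)[2 - nd]? with
      | some j => (j + 1, 3)
      | none => (s + lst.length, nd + (matchIdxs lst s).length) := by
  induction lst generalizing s nd with
  | nil => simp [findTopLoop, matchIdxs_nil]
  | cons x rest ih =>
    rw [matchIdxs_cons]
    by_cases hx : x == "---\n"
    · simp only [findTopLoop, if_pos h, hx, if_true]
      by_cases h2 : nd + 1 < 3
      · rw [ih (s + 1) (nd + 1) h2]
        have h21 : 2 - nd = (2 - (nd + 1)) + 1 := by omega
        rw [h21]
        simp only [List.getElem?_cons_succ]
        cases hm : (matchIdxs rest (s + 1))[2 - (nd + 1)]? with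
        | some j => simp
        | none =>
          simp only [List.length_cons]
          rw [Prod.mk.injEq]
          refine ⟨?_, by omega⟩
          push_cast
          ring
      · have hnd : nd = 2 := by omega
        subst hnd
        rw [findTopLoop_done]
        simp
    · simp only [findTopLoop, if_pos h, if_neg hx]
      rw [ih (s + 1) nd h]
      cases hm : (matchIdxs rest (s + 1))[2 - nd]? with
      | some j => simp
      | none =>
        simp only [List.length_cons]
        rw [Prod.mk.injEq]
        refine ⟨?_, rfl⟩
        push_cast
        ring

-- ===== VERDICT (by name: the statement is the Claim_ definition above) =====
theorem find_top_lines_spec : Claim_equal_find_top_lines := by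
  intro lst _
  unfold Spec_find_top_lines find_top_lines find_top_lines_alt
  rw [show ((PySem.List.enumerate lst).filter (fun p => p.2 == "---\n")).map (fun p => p.1)
        = matchIdxs lst 0 from rfl]
  rw [findTopLoop_eq lst 0 0 (by omega)]
  cases hm : (matchIdxs lst 0)[2]? with
  | some j =>
    obtain ⟨hlt, -⟩ := List.getElem?_eq_some_iff.mp hm
    have hlen : 3 ≤ (matchIdxs lst 0).length := by omega
    simp [hm, hlen]
  | none =>
    have hlen : (matchIdxs lst 0).length ≤ 2 := List.getElem?_eq_none_iff.mp hm
    simp [show ¬ 3 ≤ (matchIdxs lst 0).length by omega]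
    intro h3
    exact absurd h3 (by omega)
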